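-- pv_equiv track=rewrite | github.com/ZuberLab/minigene-process-nf | bin/minigene_match.py | generate_barcode_variants
-- ===== SOURCE A (Python) =====
-- DNA_ALPHABET = "ACGT"
--
-- def generate_barcode_variants(seq: str, max_mismatches: int):
--     """
--     Generate all sequences within <= max_mismatches of seq.
--     Only safe for short barcodes (e.g. 8 nt).
--     """
--     variants = {seq}
--     n = len(seq)
--
--     if max_mismatches >= 1:
--         for i in range(n):
--             for base in DNA_ALPHABET:
--                 if base != seq[i]:
--                     variants.add(seq[:i] + base + seq[i + 1 :])
--
--     if max_mismatches >= 2: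
--         for i in range(n):
--             for j in range(i + 1, n):
--                 for b1 in DNA_ALPHABET:
--                     if b1 == seq[i]:
--                         continue
--                     for b2 in DNA_ALPHABET:
--                         if b2 == seq[j]:
--                             continue
--                         s_list = list(seq)
--                         s_list[i] = b1
--                         s_list[j] = b2
--                         variants.add("".join(s_list))
--
--     return variants
-- ===== SOURCE B (Python) =====
-- DNA_ALPHABET = "ACGT"
--
--
-- def _combos(items, k):
--     """All k-subsets of items, in lexicographic (itertools.combinations) order."""
--     if k == 0:
--         return [[]]
--     if not items:
--         return []
--     head, tail = items[0], items[1:]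
--     return [[head] + c for c in _combos(tail, k - 1)] + _combos(tail, k)
--
--
-- def _product(pools):
--     """Cartesian product of the pools, leftmost pool varying slowest."""
--     res = [[]]
--     for pool in pools:
--         res = [tup + [b] for tup in res for b in pool]
--     return res
--
--
-- def generate_barcode_variants(seq, max_mismatches):
--     """
--     Generate all sequences within <= max_mismatches of seq (capped at 2).
--     One generic loop over the number k of substituted positions replaces the
--     two hardcoded mismatch blocks.
--     """
--     cap = min(max(max_mismatches, 0), 2)
--     variants = set()
--     for k in range(cap + 1):
--         for combo in _combos(list(range(len(seq))), k):
--             pools = [[b for b in DNA_ALPHABET if b != seq[pos]] for pos in combo]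
--             for subs in _product(pools):
--                 chars = list(seq)
--                 for pos, b in zip(combo, subs):
--                     chars[pos] = b
--                 variants.add("".join(chars))
--     return variants
-- ===== Notes on version B (the rewrite author's own statement) =====
-- stated objective: idiomatic
-- what changed: The two hardcoded 1-mismatch and 2-mismatch loop blocks are replaced by one generic loop over the number k of substituted positions (0..min(max(max_mismatches,0),2)), enumerating position combinations and cartesian products of alternative bases.
import Mathlib
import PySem

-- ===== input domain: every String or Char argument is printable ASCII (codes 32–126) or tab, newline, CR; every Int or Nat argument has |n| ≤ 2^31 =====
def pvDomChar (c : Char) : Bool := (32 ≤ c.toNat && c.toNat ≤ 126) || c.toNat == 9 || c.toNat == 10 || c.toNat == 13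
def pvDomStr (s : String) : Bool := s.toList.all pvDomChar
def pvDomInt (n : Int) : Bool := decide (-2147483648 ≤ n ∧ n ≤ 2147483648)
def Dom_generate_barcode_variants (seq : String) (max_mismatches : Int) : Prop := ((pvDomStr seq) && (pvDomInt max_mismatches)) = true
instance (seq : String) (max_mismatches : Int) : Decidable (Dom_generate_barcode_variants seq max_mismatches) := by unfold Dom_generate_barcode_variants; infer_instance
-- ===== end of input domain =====

-- B replaces A's two hardcoded 1-/2-mismatch blocks with one generic loop over the
-- number k of substituted positions (position combinations × base products); same set,
-- same cost class (objective: alternative/idiomatic decomposition, not speed).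

-- DNA_ALPHABET = "ACGT" (iterated over as its characters)
def pvDNA : List Char := ['A', 'C', 'G', 'T']

-- ===== PORT A =====
-- string concatenation seq[:i] + base + seq[i+1:] and "".join are ported as
-- String.ofList over List Char concatenation (exact); seq[i] / s_list[i] = b use
-- pyGetD / pySetD, exact here since every index i, j lies in range(len(seq)).
def generate_barcode_variants (seq : String) (max_mismatches : Int) : List String :=
  let cs := seq.toList
  let variants : PySem.Set String := PySem.Set.ofList [seq]
  let n : Int := cs.length
  let variants :=
    if max_mismatches ≥ 1 then
      (PySem.List.pyRange 0 n 1).foldl (fun v i =>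
        pvDNA.foldl (fun v base =>
          if base ≠ PySem.List.pyGetD cs i 'A' then
            PySem.Set.add v (String.ofList
              (PySem.List.slice cs none (some i) ++ [base] ++ PySem.List.slice cs (some (i + 1)) none))
          else v) v) variants
    else variants
  let variants :=
    if max_mismatches ≥ 2 then
      (PySem.List.pyRange 0 n 1).foldl (fun v i =>
        (PySem.List.pyRange (i + 1) n 1).foldl (fun v j =>
          pvDNA.foldl (fun v b1 =>
            if b1 = PySem.List.pyGetD cs i 'A' then v
            else pvDNA.foldl (fun v b2 =>
              if b2 = PySem.List.pyGetD cs j 'A' then v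
              else
                let s1 := PySem.List.pySetD cs i b1
                let s2 := PySem.List.pySetD s1 j b2
                PySem.Set.add v (String.ofList s2)) v) v) v) variants
    else variants
  variants

-- ===== PORT B =====
-- _combos(items, k): k-subsets in lexicographic order (recursion on items, as in Source B)
def pvCombos {α : Type} (items : List α) (k : Int) : List (List α) :=
  if k = 0 then [[]]
  else
    match items with
    | [] => []
    | x :: xs => (pvCombos xs (k - 1)).map (fun c => x :: c) ++ pvCombos xs k
termination_by items.length
decreasing_by all_goals simp

-- _product(pools): cartesian product, leftmost pool varying slowest (fold, as in Source B)
def pvProduct {α : Type} (pools : List (List α)) : List (List α) :=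
  pools.foldl (fun res pool => res.flatMap (fun tup => pool.map (fun b => tup ++ [b]))) [[]]

def generate_barcode_variants_alt (seq : String) (max_mismatches : Int) : List String :=
  let cs := seq.toList
  let n : Int := cs.length
  let cap := min (max max_mismatches 0) 2
  (PySem.List.pyRange 0 (cap + 1) 1).foldl (fun v k =>
    (pvCombos (PySem.List.pyRange 0 n 1) k).foldl (fun v combo =>
      let pools := combo.map (fun pos => pvDNA.filter (fun b => b ≠ PySem.List.pyGetD cs pos 'A'))
      (pvProduct pools).foldl (fun v subs =>
        let chars := (combo.zip subs).foldl (fun chars pb => PySem.List.pySetD chars pb.1 pb.2) cs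
        PySem.Set.add v (String.ofList chars)) v) v) PySem.Set.empty

-- ===== PRECONDITION & SPEC =====
def Spec_generate_barcode_variants (seq : String) (max_mismatches : Int) (out : List String) : Prop := out = generate_barcode_variants_alt seq max_mismatches
instance (seq : String) (max_mismatches : Int) (out : List String) : Decidable (Spec_generate_barcode_variants seq max_mismatches out) := by unfold Spec_generate_barcode_variants; infer_instance

-- ===== CLAIM (what is proved, stated in full; the proofs are below) =====
def Claim_equal_generate_barcode_variants : Prop := ∀ (seq : String) (max_mismatches : Int), Dom_generate_barcode_variants seq max_mismatches → Spec_generate_barcode_variants seq max_mismatches (generate_barcode_variants seq max_mismatches)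

-- ===== LEMMAS AND PROOFS =====

-- the list of alternative bases at position i
def pvAlts (cs : List Char) (i : Int) : List Char :=
  pvDNA.filter (fun b => b ≠ PySem.List.pyGetD cs i 'A')

-- A's 1-mismatch stream and 2-mismatch stream, in A's generation order
def pvL1 (cs : List Char) : List String :=
  (PySem.List.pyRange 0 (cs.length : Int) 1).flatMap (fun i =>
    (pvAlts cs i).map (fun b => String.ofList
      (PySem.List.slice cs none (some i) ++ [b] ++ PySem.List.slice cs (some (i + 1)) none)))

def pvL2 (cs : List Char) : List String :=
  (PySem.List.pyRange 0 (cs.length : Int) 1).flatMap (fun i =>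
    (PySem.List.pyRange (i + 1) (cs.length : Int) 1).flatMap (fun j =>
      (pvAlts cs i).flatMap (fun b1 =>
        (pvAlts cs j).map (fun b2 =>
          String.ofList (PySem.List.pySetD (PySem.List.pySetD cs i b1) j b2)))))

-- B's per-k stream
def pvBK (cs : List Char) (k : Int) : List String :=
  (pvCombos (PySem.List.pyRange 0 (cs.length : Int) 1) k).flatMap (fun combo =>
    (pvProduct (combo.map (fun pos => pvDNA.filter (fun b => b ≠ PySem.List.pyGetD cs pos 'A')))).map
      (fun subs => String.ofList
        ((combo.zip subs).foldl (fun chars pb => PySem.List.pySetD chars pb.1 pb.2) cs)))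

theorem pvCombos_zero {α : Type} (l : List α) : pvCombos l 0 = [[]] := by
  rw [pvCombos.eq_def]; simp

theorem pvCombos_one {α : Type} (l : List α) : pvCombos l 1 = l.map (fun x => [x]) := by
  induction l with
  | nil => simp [pvCombos]
  | cons x xs ih => rw [pvCombos.eq_def]; simp [pvCombos_zero, ih]

theorem pvBK_zero (cs : List Char) : pvBK cs 0 = [String.ofList cs] := by
  simp [pvBK, pvCombos_zero, pvProduct]

theorem pvBK_one (cs : List Char) : pvBK cs 1 = pvL1 cs := by
  unfold pvBK pvL1
  rw [pvCombos_one, List.flatMap_map]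
  apply List.flatMap_congr
  intro i hi
  have h := (PySem.List.mem_pyRange_one).mp hi
  have h0 : (0:Int) ≤ i := h.1
  have h1 : i < (cs.length : Int) := h.2
  have hlt : i.toNat < cs.length := by omega
  simp only [pvProduct, pvAlts, List.map_cons, List.map_nil, List.foldl_cons, List.foldl_nil,
    List.flatMap_cons, List.flatMap_nil, List.nil_append, List.map_map, List.append_nil]
  apply List.map_congr_left
  intro b _
  simp only [Function.comp_apply, List.zip_cons_cons, List.zip_nil_left, List.foldl_cons, List.foldl_nil]
  rw [show PySem.List.pySetD cs i b = cs.set i.toNat b from PySem.List.pySetD_of_nonneg cs b h0,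
    List.set_eq_take_cons_drop b hlt,
    PySem.List.slice_to cs h0, PySem.List.slice_from cs (by omega : (0:Int) ≤ i + 1)]
  have : (i + 1).toNat = i.toNat + 1 := by omega
  rw [this]
  simp

theorem combos2_flatMap {β : Type} (n : Int) (H : List Int → List β) :
    ∀ (m : Nat) (a : Int), (n - a).toNat = m →
      (pvCombos (PySem.List.pyRange a n 1) 2).flatMap H
        = (PySem.List.pyRange a n 1).flatMap (fun i =>
            (PySem.List.pyRange (i + 1) n 1).flatMap (fun j => H [i, j])) := by
  intro m
  induction m with
  | zero =>
      intro a ha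
      rw [PySem.List.pyRange_one_eq_nil (by omega), pvCombos.eq_def]
      simp
  | succ m ih =>
      intro a ha
      by_cases hlt : a < n
      · rw [PySem.List.pyRange_one_cons hlt]
        rw [pvCombos.eq_def]
        simp only [OfNat.ofNat_ne_zero, if_false]
        rw [show (2:Int) - 1 = 1 by norm_num, pvCombos_one,
          List.flatMap_append, List.flatMap_map, List.flatMap_cons, ih (a + 1) (by omega)]
        simp [List.flatMap_map]
      · rw [PySem.List.pyRange_one_eq_nil (by omega), pvCombos.eq_def]
        simp

theorem pvBK_two (cs : List Char) : pvBK cs 2 = pvL2 cs := by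
  unfold pvBK pvL2
  rw [combos2_flatMap (cs.length : Int) _ ((cs.length : Int) - 0).toNat 0 rfl]
  apply List.flatMap_congr
  intro i _
  apply List.flatMap_congr
  intro j _
  simp [pvProduct, pvAlts, List.flatMap_map, List.map_flatMap, List.map_map, Function.comp_def]

-- converting A's nested Set.add loops into folds over the generation streams
theorem foldA1_eq (cs : List Char) (v : PySem.Set String) :
    (PySem.List.pyRange 0 (cs.length : Int) 1).foldl (fun v i =>
      pvDNA.foldl (fun v base =>
        if base ≠ PySem.List.pyGetD cs i 'A' then
          PySem.Set.add v (String.ofList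
            (PySem.List.slice cs none (some i) ++ [base] ++ PySem.List.slice cs (some (i + 1)) none))
        else v) v) v
    = (pvL1 cs).foldl PySem.Set.add v := by
  rw [pvL1, List.foldl_flatMap]
  apply PySem.List.foldl_congr_mem
  intro acc i _
  rw [List.foldl_map,
    PySem.List.foldl_ite_eq_foldl_filter (p := fun base => base ≠ PySem.List.pyGetD cs i 'A')]
  rfl

theorem foldA2_eq (cs : List Char) (v : PySem.Set String) :
    (PySem.List.pyRange 0 (cs.length : Int) 1).foldl (fun v i =>
      (PySem.List.pyRange (i + 1) (cs.length : Int) 1).foldl (fun v j =>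
        pvDNA.foldl (fun v b1 =>
          if b1 = PySem.List.pyGetD cs i 'A' then v
          else pvDNA.foldl (fun v b2 =>
            if b2 = PySem.List.pyGetD cs j 'A' then v
            else
              let s1 := PySem.List.pySetD cs i b1
              let s2 := PySem.List.pySetD s1 j b2
              PySem.Set.add v (String.ofList s2)) v) v) v) v
    = (pvL2 cs).foldl PySem.Set.add v := by
  rw [pvL2, List.foldl_flatMap]
  apply PySem.List.foldl_congr_mem
  intro acc i _
  rw [List.foldl_flatMap]
  apply PySem.List.foldl_congr_mem
  intro acc2 j _
  rw [List.foldl_flatMap]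
  have flip1 : ∀ (w : PySem.Set String) (b1 : Char),
      (if b1 = PySem.List.pyGetD cs i 'A' then w
       else pvDNA.foldl (fun v b2 =>
            if b2 = PySem.List.pyGetD cs j 'A' then v
            else
              let s1 := PySem.List.pySetD cs i b1
              let s2 := PySem.List.pySetD s1 j b2
              PySem.Set.add v (String.ofList s2)) w)
      = (if b1 ≠ PySem.List.pyGetD cs i 'A' then
           pvDNA.foldl (fun v b2 =>
            if b2 = PySem.List.pyGetD cs j 'A' then v
            else
              let s1 := PySem.List.pySetD cs i b1
              let s2 := PySem.List.pySetD s1 j b2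
              PySem.Set.add v (String.ofList s2)) w
         else w) := by
    intro w b1
    by_cases hb : b1 = PySem.List.pyGetD cs i 'A' <;> simp [hb]
  rw [PySem.List.foldl_congr_mem pvDNA _ _ acc2 (fun w b1 _ => flip1 w b1),
    PySem.List.foldl_ite_eq_foldl_filter (p := fun b1 => b1 ≠ PySem.List.pyGetD cs i 'A')]
  apply PySem.List.foldl_congr_mem
  intro acc3 b1 _
  rw [List.foldl_map]
  have flip2 : ∀ (w : PySem.Set String) (b2 : Char),
      (if b2 = PySem.List.pyGetD cs j 'A' then w
       else
         let s1 := PySem.List.pySetD cs i b1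
         let s2 := PySem.List.pySetD s1 j b2
         PySem.Set.add w (String.ofList s2))
      = (if b2 ≠ PySem.List.pyGetD cs j 'A' then
           PySem.Set.add w (String.ofList (PySem.List.pySetD (PySem.List.pySetD cs i b1) j b2))
         else w) := by
    intro w b2
    by_cases hb : b2 = PySem.List.pyGetD cs j 'A' <;> simp [hb]
  rw [PySem.List.foldl_congr_mem pvDNA _ _ acc3 (fun w b2 _ => flip2 w b2),
    PySem.List.foldl_ite_eq_foldl_filter (p := fun b2 => b2 ≠ PySem.List.pyGetD cs j 'A')]
  rfl

-- converting B's per-k nested loops into a fold over B's per-k stream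
theorem foldBK_eq (cs : List Char) (k : Int) (v : PySem.Set String) :
    (pvCombos (PySem.List.pyRange 0 (cs.length : Int) 1) k).foldl (fun v combo =>
      (pvProduct (combo.map (fun pos => pvDNA.filter (fun b => b ≠ PySem.List.pyGetD cs pos 'A')))).foldl
        (fun v subs => PySem.Set.add v (String.ofList
          ((combo.zip subs).foldl (fun chars pb => PySem.List.pySetD chars pb.1 pb.2) cs))) v) v
    = (pvBK cs k).foldl PySem.Set.add v := by
  rw [pvBK, List.foldl_flatMap]
  apply PySem.List.foldl_congr_mem
  intro acc combo _
  rw [List.foldl_map]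

-- A's result as a single fold of Set.add over its generation stream
theorem portA_eq (seq : String) (mm : Int) :
    generate_barcode_variants seq mm =
      ([seq] ++ (if mm ≥ 1 then pvL1 seq.toList else [])
            ++ (if mm ≥ 2 then pvL2 seq.toList else [])).foldl PySem.Set.add PySem.Set.empty := by
  unfold generate_barcode_variants
  by_cases h1 : mm ≥ 1
  · by_cases h2 : mm ≥ 2
    · simp only [if_pos h1, if_pos h2, List.foldl_append]
      rw [foldA1_eq, foldA2_eq]
      rfl
    · simp only [if_pos h1, if_neg h2, List.foldl_append]
      rw [foldA1_eq]
      rfl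
  · have h2 : ¬ mm ≥ 2 := by omega
    simp only [if_neg h1, if_neg h2, List.foldl_append]
    rfl

-- B's result as the same fold
theorem portB_eq (seq : String) (mm : Int) :
    generate_barcode_variants_alt seq mm =
      ([seq] ++ (if mm ≥ 1 then pvL1 seq.toList else [])
            ++ (if mm ≥ 2 then pvL2 seq.toList else [])).foldl PySem.Set.add PySem.Set.empty := by
  unfold generate_barcode_variants_alt
  by_cases h2 : mm ≥ 2
  · have hcap : min (max mm 0) 2 = 2 := by omega
    have h1 : mm ≥ 1 := by omega
    have hK : PySem.List.pyRange 0 ((2:Int) + 1) 1 = [0, 1, 2] := by decide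
    simp only [hcap, hK, List.foldl_cons, List.foldl_nil, if_pos h1, if_pos h2, List.foldl_append]
    rw [foldBK_eq, foldBK_eq, foldBK_eq, pvBK_zero, pvBK_one, pvBK_two]
    simp [String.ofList_toList]
  · by_cases h1 : mm ≥ 1
    · have hcap : min (max mm 0) 2 = 1 := by omega
      have hK : PySem.List.pyRange 0 ((1:Int) + 1) 1 = [0, 1] := by decide
      simp only [hcap, hK, List.foldl_cons, List.foldl_nil, if_pos h1, if_neg h2, List.foldl_append]
      rw [foldBK_eq, foldBK_eq, pvBK_zero, pvBK_one]
      simp [String.ofList_toList]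
    · have hcap : min (max mm 0) 2 = 0 := by omega
      have hK : PySem.List.pyRange 0 ((0:Int) + 1) 1 = [0] := by decide
      simp only [hcap, hK, List.foldl_cons, List.foldl_nil, if_neg h1, if_neg h2, List.foldl_append]
      rw [foldBK_eq, pvBK_zero]
      simp [String.ofList_toList]

-- ===== VERDICT (by name: the statement is the Claim_ definition above) =====
theorem generate_barcode_variants_spec : Claim_equal_generate_barcode_variants := by
  intro seq mm _
  unfold Spec_generate_barcode_variants
  rw [portA_eq, portB_eq]
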